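-- pv_equiv track=rewrite | github.com/ck-tech-nz/devtrack | backend/apps/kpi/suggestions.py | _generate_profile
-- ===== SOURCE A (Python) =====
-- DIM_LABELS: dict[str, str] = {
--     "efficiency": "效率",
--     "output": "产出",
--     "quality": "质量",
--     "capability": "能力",
--     "growth": "成长",
-- }
--
-- SCORE_DIMS = ("efficiency", "output", "quality", "capability", "growth")
--
-- PROFILES: dict[tuple[str, str], str] = {
--     ("efficiency", "quality"): "快速响应型，质量有提升空间",
--     ("efficiency", "capability"): "快速响应型，建议拓展技术广度",
--     ("efficiency", "output"): "快速响应型，可聚焦提升产出量",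
--     ("efficiency", "growth"): "快速响应型，建议关注持续成长",
--     ("output", "quality"): "高产出型，质量有提升空间",
--     ("output", "efficiency"): "高产出型，可适当提升响应速度",
--     ("output", "capability"): "高产出型，建议拓展技术广度",
--     ("output", "growth"): "高产出型，建议关注持续成长",
--     ("quality", "efficiency"): "精工细作型，可适当提升响应速度",
--     ("quality", "output"): "精工细作型，可聚焦提升产出量",
--     ("quality", "capability"): "精工细作型，建议拓展技术广度",
--     ("quality", "growth"): "精工细作型，建议关注持续成长",
--     ("capability", "output"): "技术全面型，可聚焦提升产出量",
--     ("capability", "efficiency"): "技术全面型，可适当提升响应速度",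
--     ("capability", "quality"): "技术全面型，质量有提升空间",
--     ("capability", "growth"): "技术全面型，建议关注持续成长",
--     ("growth", "efficiency"): "成长潜力型，可适当提升响应速度",
--     ("growth", "output"): "成长潜力型，可聚焦提升产出量",
--     ("growth", "quality"): "成长潜力型，质量有提升空间",
--     ("growth", "capability"): "成长潜力型，建议拓展技术广度",
-- }
--
-- def _generate_profile(scores: dict) -> str:
--     """根据各维度分数生成开发者画像。"""
--     dim_scores = {d: scores.get(d, 0) for d in SCORE_DIMS}
--
--     if not any(dim_scores.values()):
--         return "数据不足，暂无画像"
--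
--     max_val = max(dim_scores.values())
--     min_val = min(dim_scores.values())
--
--     if max_val - min_val < 10:
--         return "均衡发展型，各维度表现稳定"
--
--     highest = max(dim_scores, key=dim_scores.get)
--     lowest = min(dim_scores, key=dim_scores.get)
--
--     profile = PROFILES.get((highest, lowest))
--     if profile:
--         return profile
--
--     # 缺省组合：使用标签拼接
--     high_label = DIM_LABELS.get(highest, highest)
--     low_label = DIM_LABELS.get(lowest, lowest)
--     return f"{high_label}突出，{low_label}有提升空间"
-- ===== SOURCE B (Python) =====
-- DIM_LABELS = {
--     "efficiency": "效率",
--     "output": "产出",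
--     "quality": "质量",
--     "capability": "能力",
--     "growth": "成长",
-- }
--
-- SCORE_DIMS = ("efficiency", "output", "quality", "capability", "growth")
--
-- PROFILES = {
--     ("efficiency", "quality"): "快速响应型，质量有提升空间",
--     ("efficiency", "capability"): "快速响应型，建议拓展技术广度",
--     ("efficiency", "output"): "快速响应型，可聚焦提升产出量",
--     ("efficiency", "growth"): "快速响应型，建议关注持续成长",
--     ("output", "quality"): "高产出型，质量有提升空间",
--     ("output", "efficiency"): "高产出型，可适当提升响应速度",
--     ("output", "capability"): "高产出型，建议拓展技术广度",
--     ("output", "growth"): "高产出型，建议关注持续成长",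
--     ("quality", "efficiency"): "精工细作型，可适当提升响应速度",
--     ("quality", "output"): "精工细作型，可聚焦提升产出量",
--     ("quality", "capability"): "精工细作型，建议拓展技术广度",
--     ("quality", "growth"): "精工细作型，建议关注持续成长",
--     ("capability", "output"): "技术全面型，可聚焦提升产出量",
--     ("capability", "efficiency"): "技术全面型，可适当提升响应速度",
--     ("capability", "quality"): "技术全面型，质量有提升空间",
--     ("capability", "growth"): "技术全面型，建议关注持续成长",
--     ("growth", "efficiency"): "成长潜力型，可适当提升响应速度",
--     ("growth", "output"): "成长潜力型，可聚焦提升产出量",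
--     ("growth", "quality"): "成长潜力型，质量有提升空间",
--     ("growth", "capability"): "成长潜力型，建议拓展技术广度",
-- }
--
--
-- def _generate_profile(scores: dict) -> str:
--     """Single pass over SCORE_DIMS threading running max/min state."""
--     first = SCORE_DIMS[0]
--     v0 = scores.get(first, 0)
--     any_nonzero = v0 != 0
--     max_val = min_val = v0
--     highest = lowest = first
--     for d in SCORE_DIMS[1:]:
--         v = scores.get(d, 0)
--         if v != 0:
--             any_nonzero = True
--         if v > max_val:
--             max_val = v
--             highest = d
--         if v < min_val:
--             min_val = v
--             lowest = d
--
--     if not any_nonzero: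
--         return "数据不足，暂无画像"
--     if max_val - min_val < 10:
--         return "均衡发展型，各维度表现稳定"
--     return PROFILES.get((highest, lowest)) or (
--         f"{DIM_LABELS.get(highest, highest)}突出，{DIM_LABELS.get(lowest, lowest)}有提升空间"
--     )
-- ===== Notes on version B (the rewrite author's own statement) =====
-- stated objective: alternative
-- what changed: Replaces A's five separate scans (any(), max(values), min(values), max(key=get), min(key=get)) with a single loop over SCORE_DIMS threading (any_nonzero, max_val, min_val, highest, lowest), using strict comparisons so the first dimension in order wins ties exactly as max/min do.
import Mathlib
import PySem

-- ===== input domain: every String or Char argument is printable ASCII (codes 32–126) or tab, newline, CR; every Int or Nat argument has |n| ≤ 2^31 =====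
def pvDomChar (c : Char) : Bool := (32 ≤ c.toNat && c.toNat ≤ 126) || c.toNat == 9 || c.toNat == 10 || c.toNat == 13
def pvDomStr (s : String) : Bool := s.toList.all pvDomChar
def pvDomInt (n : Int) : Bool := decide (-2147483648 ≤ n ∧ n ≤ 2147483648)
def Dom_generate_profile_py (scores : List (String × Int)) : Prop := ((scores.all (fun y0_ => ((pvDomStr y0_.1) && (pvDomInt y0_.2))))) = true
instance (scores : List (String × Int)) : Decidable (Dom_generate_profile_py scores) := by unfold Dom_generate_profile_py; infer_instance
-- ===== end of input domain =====

-- B replaces A's four separate scans (any / max / min / argmax / argmin) by one loop over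
-- SCORE_DIMS threading (any_nonzero, max_val, min_val, highest, lowest); same return value.

-- shared module constants (shared data, not logic)
def pvScoreDims : List String := ["efficiency", "output", "quality", "capability", "growth"]

def pvDimLabels : PySem.Dict String String :=
  PySem.Dict.ofList
    [("efficiency", "效率"), ("output", "产出"), ("quality", "质量"),
     ("capability", "能力"), ("growth", "成长")]

def pvProfiles : PySem.Dict (String × String) String :=
  PySem.Dict.ofList
    [(("efficiency", "quality"), "快速响应型，质量有提升空间"),
     (("efficiency", "capability"), "快速响应型，建议拓展技术广度"),
     (("efficiency", "output"), "快速响应型，可聚焦提升产出量"),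
     (("efficiency", "growth"), "快速响应型，建议关注持续成长"),
     (("output", "quality"), "高产出型，质量有提升空间"),
     (("output", "efficiency"), "高产出型，可适当提升响应速度"),
     (("output", "capability"), "高产出型，建议拓展技术广度"),
     (("output", "growth"), "高产出型，建议关注持续成长"),
     (("quality", "efficiency"), "精工细作型，可适当提升响应速度"),
     (("quality", "output"), "精工细作型，可聚焦提升产出量"),
     (("quality", "capability"), "精工细作型，建议拓展技术广度"),
     (("quality", "growth"), "精工细作型，建议关注持续成长"),
     (("capability", "output"), "技术全面型，可聚焦提升产出量"),
     (("capability", "efficiency"), "技术全面型，可适当提升响应速度"),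
     (("capability", "quality"), "技术全面型，质量有提升空间"),
     (("capability", "growth"), "技术全面型，建议关注持续成长"),
     (("growth", "efficiency"), "成长潜力型，可适当提升响应速度"),
     (("growth", "output"), "成长潜力型，可聚焦提升产出量"),
     (("growth", "quality"), "成长潜力型，质量有提升空间"),
     (("growth", "capability"), "成长潜力型，建议拓展技术广度")]

-- ===== PORT A =====
-- literal port of _generate_profile: dict comprehension, any(), max/min of values,
-- max/min with key (first extremal), PROFILES.get, label fallback.
def generate_profile_py (scores : List (String × Int)) : String :=
  let sd := PySem.Dict.ofList scores
  let dim_scores : PySem.Dict String Int :=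
    PySem.Dict.ofList (pvScoreDims.map (fun d => (d, sd.getD d 0)))
  if !(dim_scores.values.any (fun v => v != 0)) then "数据不足，暂无画像"
  else
    -- dim_scores has the five keys, so values is nonempty and max?/min? never return none
    let max_val := (PySem.List.max? dim_scores.values (fun v => v)).getD 0
    let min_val := (PySem.List.min? dim_scores.values (fun v => v)).getD 0
    if max_val - min_val < 10 then "均衡发展型，各维度表现稳定"
    else
      let highest := (PySem.List.max? dim_scores.keys (fun d => dim_scores.getD d 0)).getD ""
      let lowest := (PySem.List.min? dim_scores.keys (fun d => dim_scores.getD d 0)).getD ""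
      match pvProfiles.get? (highest, lowest) with
      | some p => if p != "" then p
                  else (pvDimLabels.getD highest highest) ++ "突出，" ++ (pvDimLabels.getD lowest lowest) ++ "有提升空间"
      | none => (pvDimLabels.getD highest highest) ++ "突出，" ++ (pvDimLabels.getD lowest lowest) ++ "有提升空间"

-- ===== PORT B =====
-- literal port of Source B: one fold over the remaining dims threading
-- (any_nonzero, max_val, min_val, highest, lowest), then the three-way return.
-- one fold step: threads (any_nonzero, max_val, min_val, highest, lowest); kf is scores.get(d, 0)
def pvAltStep (kf : String → Int) (s : Bool × Int × Int × String × String) (d : String) :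
    Bool × Int × Int × String × String :=
  let v := kf d
  ( (if v != 0 then true else s.1),
    (if v > s.2.1 then v else s.2.1),
    (if v < s.2.2.1 then v else s.2.2.1),
    (if v > s.2.1 then d else s.2.2.2.1),
    (if v < s.2.2.1 then d else s.2.2.2.2) )

def generate_profile_py_alt (scores : List (String × Int)) : String :=
  let sd := PySem.Dict.ofList scores
  let v0 := sd.getD "efficiency" 0
  let st : Bool × Int × Int × String × String :=
    ["output", "quality", "capability", "growth"].foldl
      (pvAltStep (fun d => sd.getD d 0))
      (v0 != 0, v0, v0, "efficiency", "efficiency")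
  if !st.1 then "数据不足，暂无画像"
  else if st.2.1 - st.2.2.1 < 10 then "均衡发展型，各维度表现稳定"
  else
    match pvProfiles.get? (st.2.2.2.1, st.2.2.2.2) with
    | some p => if p != "" then p
                else (pvDimLabels.getD st.2.2.2.1 st.2.2.2.1) ++ "突出，" ++ (pvDimLabels.getD st.2.2.2.2 st.2.2.2.2) ++ "有提升空间"
    | none => (pvDimLabels.getD st.2.2.2.1 st.2.2.2.1) ++ "突出，" ++ (pvDimLabels.getD st.2.2.2.2 st.2.2.2.2) ++ "有提升空间"

-- ===== PRECONDITION & SPEC =====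
def Spec_generate_profile_py (scores : List (String × Int)) (out : String) : Prop := out = generate_profile_py_alt scores
instance (scores : List (String × Int)) (out : String) : Decidable (Spec_generate_profile_py scores out) := by unfold Spec_generate_profile_py; infer_instance

-- ===== CLAIM (what is proved, stated in full; the proofs are below) =====
def Claim_equal_generate_profile_py : Prop := ∀ (scores : List (String × Int)), Dom_generate_profile_py scores → Spec_generate_profile_py scores (generate_profile_py scores)

-- ===== LEMMAS AND PROOFS =====

-- fold steps of A's four scans, and B's pair-fold counterparts (proof-only helpers)
def pvStepMax {α : Type} (kf : α → Int) (acc : Option α) (x : α) : Option α :=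
  match acc with
  | none => some x
  | some m => if kf m < kf x then some x else some m

def pvStepMin {α : Type} (kf : α → Int) (acc : Option α) (x : α) : Option α :=
  match acc with
  | none => some x
  | some m => if kf x < kf m then some x else some m

def pvPMax (kf : String → Int) (s : Int × String) (d : String) : Int × String :=
  if kf d > s.1 then (kf d, d) else s

def pvPMin (kf : String → Int) (s : Int × String) (d : String) : Int × String :=
  if kf d < s.1 then (kf d, d) else s

def pvAnyStep (kf : String → Int) (a : Bool) (d : String) : Bool :=
  if kf d != 0 then true else a

theorem pv_max?_eq_foldl {α : Type} (kf : α → Int) (xs : List α) :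
    PySem.List.max? xs kf = xs.foldl (pvStepMax kf) none := rfl

theorem pv_min?_eq_foldl {α : Type} (kf : α → Int) (xs : List α) :
    PySem.List.min? xs kf = xs.foldl (pvStepMin kf) none := rfl

theorem pv_foldl_stepmax_none {α : Type} (kf : α → Int) (x : α) (t : List α) :
    List.foldl (pvStepMax kf) none (x :: t) = List.foldl (pvStepMax kf) (some x) t := rfl

theorem pv_foldl_stepmin_none {α : Type} (kf : α → Int) (x : α) (t : List α) :
    List.foldl (pvStepMin kf) none (x :: t) = List.foldl (pvStepMin kf) (some x) t := rfl

theorem pv_argmax_fold (kf : String → Int) :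
    ∀ (ds : List String) (v : Int) (h : String), v = kf h →
      List.foldl (pvStepMax kf) (some h) ds = some ((List.foldl (pvPMax kf) (v, h) ds).2) := by
  intro ds
  induction ds with
  | nil => intro v h _; simp [List.foldl]
  | cons d t ih =>
    intro v h hv
    by_cases hc : kf h < kf d
    · have h1 : pvStepMax kf (some h) d = some d := by simp [pvStepMax, hc]
      have h2 : pvPMax kf (v, h) d = (kf d, d) := by simp [pvPMax, hv, hc]
      simp only [List.foldl_cons, h1, h2]
      exact ih (kf d) d rfl
    · have h1 : pvStepMax kf (some h) d = some h := by simp [pvStepMax, hc]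
      have h2 : pvPMax kf (v, h) d = (v, h) := by simp [pvPMax, hv, hc]
      simp only [List.foldl_cons, h1, h2]
      exact ih v h hv

theorem pv_argmin_fold (kf : String → Int) :
    ∀ (ds : List String) (v : Int) (h : String), v = kf h →
      List.foldl (pvStepMin kf) (some h) ds = some ((List.foldl (pvPMin kf) (v, h) ds).2) := by
  intro ds
  induction ds with
  | nil => intro v h _; simp [List.foldl]
  | cons d t ih =>
    intro v h hv
    by_cases hc : kf d < kf h
    · have h1 : pvStepMin kf (some h) d = some d := by simp [pvStepMin, hc]
      have h2 : pvPMin kf (v, h) d = (kf d, d) := by simp [pvPMin, hv, hc]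
      simp only [List.foldl_cons, h1, h2]
      exact ih (kf d) d rfl
    · have h1 : pvStepMin kf (some h) d = some h := by simp [pvStepMin, hc]
      have h2 : pvPMin kf (v, h) d = (v, h) := by simp [pvPMin, hv, hc]
      simp only [List.foldl_cons, h1, h2]
      exact ih v h hv

theorem pv_maxval_fold (kf : String → Int) :
    ∀ (ds : List String) (v : Int) (h : String), v = kf h →
      List.foldl (pvStepMax (fun x : Int => x)) (some v) (List.map kf ds)
        = some ((List.foldl (pvPMax kf) (v, h) ds).1) := by
  intro ds
  induction ds with
  | nil => intro v h _; simp [List.foldl]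
  | cons d t ih =>
    intro v h hv
    by_cases hc : v < kf d
    · have h1 : pvStepMax (fun x : Int => x) (some v) (kf d) = some (kf d) := by
        simp [pvStepMax, hc]
      have h2 : pvPMax kf (v, h) d = (kf d, d) := by simp [pvPMax, hc]
      simp only [List.map_cons, List.foldl_cons, h1, h2]
      exact ih (kf d) d rfl
    · have h1 : pvStepMax (fun x : Int => x) (some v) (kf d) = some v := by
        simp [pvStepMax, hc]
      have h2 : pvPMax kf (v, h) d = (v, h) := by simp [pvPMax, hc]
      simp only [List.map_cons, List.foldl_cons, h1, h2]
      exact ih v h hv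

theorem pv_minval_fold (kf : String → Int) :
    ∀ (ds : List String) (v : Int) (h : String), v = kf h →
      List.foldl (pvStepMin (fun x : Int => x)) (some v) (List.map kf ds)
        = some ((List.foldl (pvPMin kf) (v, h) ds).1) := by
  intro ds
  induction ds with
  | nil => intro v h _; simp [List.foldl]
  | cons d t ih =>
    intro v h hv
    by_cases hc : kf d < v
    · have h1 : pvStepMin (fun x : Int => x) (some v) (kf d) = some (kf d) := by
        simp [pvStepMin, hc]
      have h2 : pvPMin kf (v, h) d = (kf d, d) := by simp [pvPMin, hc]
      simp only [List.map_cons, List.foldl_cons, h1, h2]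
      exact ih (kf d) d rfl
    · have h1 : pvStepMin (fun x : Int => x) (some v) (kf d) = some v := by
        simp [pvStepMin, hc]
      have h2 : pvPMin kf (v, h) d = (v, h) := by simp [pvPMin, hc]
      simp only [List.map_cons, List.foldl_cons, h1, h2]
      exact ih v h hv

theorem pv_any_fold (kf : String → Int) :
    ∀ (ds : List String) (b : Bool),
      List.foldl (pvAnyStep kf) b ds = (b || List.any (List.map kf ds) (fun v => v != 0)) := by
  intro ds
  induction ds with
  | nil => intro b; simp [List.foldl]
  | cons d t ih =>
    intro b
    simp only [List.foldl_cons, List.map_cons, List.any_cons, ih]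
    by_cases hc : kf d = 0 <;> cases b <;> simp [pvAnyStep, hc]

theorem pv_alt_fold (kf : String → Int) :
    ∀ (ds : List String) (b : Bool) (mx mn : Int) (hi lo : String),
      List.foldl (pvAltStep kf) (b, mx, mn, hi, lo) ds
        = (List.foldl (pvAnyStep kf) b ds,
           (List.foldl (pvPMax kf) (mx, hi) ds).1, (List.foldl (pvPMin kf) (mn, lo) ds).1,
           (List.foldl (pvPMax kf) (mx, hi) ds).2, (List.foldl (pvPMin kf) (mn, lo) ds).2) := by
  intro ds
  induction ds with
  | nil => intro b mx mn hi lo; simp [List.foldl]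
  | cons d t ih =>
    intro b mx mn hi lo
    have hstep : pvAltStep kf (b, mx, mn, hi, lo) d
        = (pvAnyStep kf b d, (pvPMax kf (mx, hi) d).1, (pvPMin kf (mn, lo) d).1,
           (pvPMax kf (mx, hi) d).2, (pvPMin kf (mn, lo) d).2) := by
      by_cases h1 : mx < kf d <;> by_cases h2 : kf d < mn <;>
        simp [pvAltStep, pvAnyStep, pvPMax, pvPMin, h1, h2]
    simp only [List.foldl_cons, hstep]
    exact ih _ _ _ _ _

-- ===== VERDICT (by name: the statement is the Claim_ definition above) =====
theorem generate_profile_py_spec : Claim_equal_generate_profile_py := by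
  intro scores _h
  unfold Spec_generate_profile_py generate_profile_py generate_profile_py_alt
  simp only [pvScoreDims, List.map]
  generalize PySem.Dict.ofList scores = sd
  have hds : PySem.Dict.ofList
      [("efficiency", sd.getD "efficiency" 0), ("output", sd.getD "output" 0),
       ("quality", sd.getD "quality" 0), ("capability", sd.getD "capability" 0),
       ("growth", sd.getD "growth" 0)]
      = PySem.Dict.mk
      [("efficiency", sd.getD "efficiency" 0), ("output", sd.getD "output" 0),
       ("quality", sd.getD "quality" 0), ("capability", sd.getD "capability" 0),
       ("growth", sd.getD "growth" 0)] := rfl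
  rw [hds]
  set dsd := PySem.Dict.mk
      [("efficiency", sd.getD "efficiency" 0), ("output", sd.getD "output" 0),
       ("quality", sd.getD "quality" 0), ("capability", sd.getD "capability" 0),
       ("growth", sd.getD "growth" 0)] with hdsd
  have hvals : dsd.values = [sd.getD "efficiency" 0, sd.getD "output" 0, sd.getD "quality" 0,
      sd.getD "capability" 0, sd.getD "growth" 0] := rfl
  have hkeys : dsd.keys = ["efficiency", "output", "quality", "capability", "growth"] := rfl
  rw [hvals, hkeys]
  simp only [List.any_cons, List.any_nil]
  have hmapRev : [sd.getD "output" 0, sd.getD "quality" 0, sd.getD "capability" 0, sd.getD "growth" 0]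
      = List.map (fun d => dsd.getD d 0) ["output", "quality", "capability", "growth"] := rfl
  simp only [hmapRev]
  simp only [pv_max?_eq_foldl, pv_min?_eq_foldl, pv_foldl_stepmax_none, pv_foldl_stepmin_none]
  rw [pv_maxval_fold (fun d => dsd.getD d 0) ["output", "quality", "capability", "growth"]
        (sd.getD "efficiency" 0) "efficiency" rfl,
      pv_minval_fold (fun d => dsd.getD d 0) ["output", "quality", "capability", "growth"]
        (sd.getD "efficiency" 0) "efficiency" rfl,
      pv_argmax_fold (fun d => dsd.getD d 0) ["output", "quality", "capability", "growth"]
        (sd.getD "efficiency" 0) "efficiency" rfl,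
      pv_argmin_fold (fun d => dsd.getD d 0) ["output", "quality", "capability", "growth"]
        (sd.getD "efficiency" 0) "efficiency" rfl]
  rw [pv_alt_fold (fun d => sd.getD d 0) ["output", "quality", "capability", "growth"]]
  rw [pv_any_fold (fun d => sd.getD d 0) ["output", "quality", "capability", "growth"]]
  simp only [List.map_cons, List.map_nil, List.any_cons, List.any_nil, Option.getD_some]
  have hPM : ∀ x : Int,
      List.foldl (pvPMax (fun d => dsd.getD d 0)) (x, "efficiency")
          ["output", "quality", "capability", "growth"]
        = List.foldl (pvPMax (fun d => sd.getD d 0)) (x, "efficiency")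
          ["output", "quality", "capability", "growth"] := by
    intro x
    have e1 : dsd.getD "output" 0 = sd.getD "output" 0 := rfl
    have e2 : dsd.getD "quality" 0 = sd.getD "quality" 0 := rfl
    have e3 : dsd.getD "capability" 0 = sd.getD "capability" 0 := rfl
    have e4 : dsd.getD "growth" 0 = sd.getD "growth" 0 := rfl
    simp only [List.foldl_cons, List.foldl_nil, pvPMax, e1, e2, e3, e4]
  have hPMin : ∀ x : Int,
      List.foldl (pvPMin (fun d => dsd.getD d 0)) (x, "efficiency")
          ["output", "quality", "capability", "growth"]
        = List.foldl (pvPMin (fun d => sd.getD d 0)) (x, "efficiency")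
          ["output", "quality", "capability", "growth"] := by
    intro x
    have e1 : dsd.getD "output" 0 = sd.getD "output" 0 := rfl
    have e2 : dsd.getD "quality" 0 = sd.getD "quality" 0 := rfl
    have e3 : dsd.getD "capability" 0 = sd.getD "capability" 0 := rfl
    have e4 : dsd.getD "growth" 0 = sd.getD "growth" 0 := rfl
    simp only [List.foldl_cons, List.foldl_nil, pvPMin, e1, e2, e3, e4]
  rw [hPM, hPMin]
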